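-- pv_equiv track=rewrite | github.com/valikminak/algorithms_toolkit | dp/classic.py | rod_cutting_with_solution
-- ===== SOURCE A (Python) =====
-- from typing import List, Dict, Tuple, Set, Optional, Any
--
-- def rod_cutting_with_solution(prices: List[int], n: int) -> Tuple[int, List[int]]:
--     """
--     Solve the rod cutting problem and return the solution.
--
--     Args:
--         prices: List of prices where prices[i] is the price of a rod of length i+1
--         n: Length of the rod
--
--     Returns:
--         Tuple of (maximum revenue, list of cut lengths)
--     """
--     # Create DP table and cut choice table
--     dp = [0] * (n + 1)
--     cut = [0] * (n + 1)
--
--     # Fill the DP table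
--     for i in range(1, n + 1):
--         max_val = float('-inf')
--         for j in range(i):
--             if max_val < prices[j] + dp[i - j - 1]:
--                 max_val = prices[j] + dp[i - j - 1]
--                 cut[i] = j + 1
--         dp[i] = max_val
--
--     # Reconstruct the solution
--     result = []
--     remaining = n
--
--     while remaining > 0:
--         result.append(cut[remaining])
--         remaining -= cut[remaining]
--
--     return dp[n], result
-- ===== SOURCE B (Python) =====
-- def rod_cutting_with_solution(prices, n):
--     # Bottom-up table of (revenue, solution) pairs: each entry carries its full
--     # cut list as a shared cons-chain, so no separate cut table and no greedy
--     # reconstruction walk are needed.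
--     table = [(0, None)]  # chain None = empty cut list; (head, tail) = cons
--     for length in range(1, n + 1):
--         best = max(
--             ((prices[j] + table[length - j - 1][0], (j + 1, table[length - j - 1][1]))
--              for j in range(length)),
--             key=lambda cand: cand[0])
--         table.append(best)
--     value, chain = table[n]
--     cuts = []
--     while chain is not None:
--         cuts.append(chain[0])
--         chain = chain[1]
--     return value, cuts
-- ===== Notes on version B (the rewrite author's own statement) =====
-- stated objective: alternative
-- what changed: B replaces A's separate cut-choice table plus greedy reconstruction walk by a single bottom-up table of (revenue, solution) pairs whose cut lists are carried as shared cons-chains, selecting each entry with max(..., key=...) instead of A's sentinel-initialised running-max loop.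
import Mathlib
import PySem

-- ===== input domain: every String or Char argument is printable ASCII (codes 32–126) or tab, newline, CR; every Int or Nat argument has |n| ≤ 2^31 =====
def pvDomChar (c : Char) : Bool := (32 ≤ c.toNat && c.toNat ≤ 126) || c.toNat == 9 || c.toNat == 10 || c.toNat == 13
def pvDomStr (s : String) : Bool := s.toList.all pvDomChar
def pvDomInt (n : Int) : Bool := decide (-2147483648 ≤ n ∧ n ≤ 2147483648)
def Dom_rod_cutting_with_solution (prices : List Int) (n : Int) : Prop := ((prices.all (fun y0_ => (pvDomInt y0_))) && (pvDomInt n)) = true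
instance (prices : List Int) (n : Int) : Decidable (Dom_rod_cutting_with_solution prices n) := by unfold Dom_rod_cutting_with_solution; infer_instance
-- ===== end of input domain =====

-- B replaces A's cut-choice table and greedy reconstruction walk by a single DP table of
-- (revenue, solution-chain) pairs; equivalence of the return values is proved on Pre_.

-- ===== PORT A =====
-- Python's `while remaining > 0` loop, ported with fuel: inside Pre_ every stored cut is ≥ 1,
-- so n steps always suffice and the fuel is never exhausted where the claim applies.
def rcA_walk (cut : List Int) : Nat → Int → List Int
  | 0, _ => []
  | fuel+1, r =>
    if 0 < r then
      PySem.List.pyGetD cut r 0 :: rcA_walk cut fuel (r - PySem.List.pyGetD cut r 0)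
    else []

-- `max_val = float('-inf')` is modelled exactly by an Option Int sentinel: `none` compares
-- smaller than every int (Python's -inf < int is always true), and for i ≥ 1 the inner loop
-- is nonempty, so dp[i] is always an int (`inner.1.getD 0`; the default is never read).
def rod_cutting_with_solution (prices : List Int) (n : Int) : Int × List Int :=
  let dp0 : List Int := List.replicate (n + 1).toNat 0
  let cut0 : List Int := List.replicate (n + 1).toNat 0
  let st := (PySem.List.pyRange 1 (n + 1)).foldl
    (fun (st : List Int × List Int) i =>
      let inner := (PySem.List.pyRange 0 i).foldl
        (fun (acc : Option Int × List Int) j =>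
          let cand := PySem.List.pyGetD prices j 0 + PySem.List.pyGetD st.1 (i - j - 1) 0
          match acc.1 with
          | none => (some cand, PySem.List.pySetD acc.2 i (j + 1))
          | some mv =>
            if mv < cand then (some cand, PySem.List.pySetD acc.2 i (j + 1)) else acc)
        ((none : Option Int), st.2)
      (PySem.List.pySetD st.1 i (inner.1.getD 0), inner.2))
    (dp0, cut0)
  (PySem.List.pyGetD st.1 n 0, rcA_walk st.2 n.toNat n)

-- ===== PORT B =====
-- the final while loop of Source B, materialising the cons-chain into a fresh list
def rcB_chainToList : List Int → List Int
  | [] => []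
  | h :: t => h :: rcB_chainToList t

def rod_cutting_with_solution_alt (prices : List Int) (n : Int) : Int × List Int :=
  let table := (PySem.List.pyRange 1 (n + 1)).foldl
    (fun (table : List (Int × List Int)) length =>
      let cands := (PySem.List.pyRange 0 length).map
        (fun j =>
          let e := PySem.List.pyGetD table (length - j - 1) (0, [])
          (PySem.List.pyGetD prices j 0 + e.1, (j + 1) :: e.2))
      table ++ [PySem.List.maxD cands (fun cand => cand.1) (0, [])])
    [((0 : Int), ([] : List Int))]
  let e := PySem.List.pyGetD table n (0, [])
  (e.1, rcB_chainToList e.2)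

-- ===== PRECONDITION & SPEC =====
-- Pre_ excludes exactly the inputs where Python A raises IndexError: n < 0 (dp[n] out of
-- range) and n > len(prices) (prices[j] out of range in the inner loop).
def Pre_rod_cutting_with_solution (prices : List Int) (n : Int) : Prop :=
  0 ≤ n ∧ n ≤ prices.length
instance (prices : List Int) (n : Int) : Decidable (Pre_rod_cutting_with_solution prices n) := by
  unfold Pre_rod_cutting_with_solution; infer_instance

def pvWitness_rod_cutting_with_solution : List Int × Int := ([1, 5, 8, 9], 4)

def Spec_rod_cutting_with_solution (prices : List Int) (n : Int) (out : Int × List Int) : Prop :=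
  out = rod_cutting_with_solution_alt prices n
instance (prices : List Int) (n : Int) (out : Int × List Int) : Decidable (Spec_rod_cutting_with_solution prices n out) := by
  unfold Spec_rod_cutting_with_solution; infer_instance

-- ===== CLAIM (what is proved, stated in full; the proofs are below) =====
def Claim_equal_rod_cutting_with_solution : Prop := ∀ (prices : List Int) (n : Int), Dom_rod_cutting_with_solution prices n → Pre_rod_cutting_with_solution prices n → Spec_rod_cutting_with_solution prices n (rod_cutting_with_solution prices n)


-- ===== LEMMAS AND PROOFS =====

-- the common mathematical content of both DP tables: best revenue and its
-- smallest-first-piece-first optimal cut list, by strong recursion on the length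
def rcTbl (prices : List Int) : Nat → Int × List Int
  | 0 => ((0 : Int), ([] : List Int))
  | m + 1 =>
    PySem.List.maxD
      ((List.range (m + 1)).map (fun (j : Nat) =>
        (PySem.List.pyGetD prices (j : Int) 0 + (rcTbl prices (m - j)).1,
         ((j : Int) + 1) :: (rcTbl prices (m - j)).2)))
      (fun c => c.1) (0, [])
  decreasing_by all_goals omega

lemma rcB_chainToList_id (l : List Int) : rcB_chainToList l = l := by
  induction l with
  | nil => rfl
  | cons h t ih => simp [rcB_chainToList, ih]

lemma rc_maxfold_map {α β : Type} (h : α → β) (key : α → Int) (key' : β → Int)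
    (hk : ∀ x, key' (h x) = key x) :
    ∀ (l : List α) (acc : Option α),
      (l.map h).foldl
        (fun acc x => match acc with
          | none => some x
          | some m => if key' m < key' x then some x else some m) (acc.map h)
      = (l.foldl
          (fun acc x => match acc with
            | none => some x
            | some m => if key m < key x then some x else some m) acc).map h := by
  intro l
  induction l with
  | nil => intro acc; rfl
  | cons x t ih =>
    intro acc
    cases acc with
    | none => simpa using ih (some x)
    | some m =>
      simp only [List.map_cons, List.foldl_cons, Option.map_some, hk]
      by_cases hlt : key m < key x
      · simpa [hlt] using ih (some x)
      · simpa [hlt] using ih (some m)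

lemma rc_max?_map {α β : Type} (h : α → β) (key : α → Int) (key' : β → Int)
    (hk : ∀ x, key' (h x) = key x) (l : List α) :
    PySem.List.max? (l.map h) key' = (PySem.List.max? l key).map h := by
  simpa [PySem.List.max?] using rc_maxfold_map h key key' hk l none

-- correspondence between A's inner-loop state and the running first-maximum
lemma rc_innerA (i : Int) (hi : 0 ≤ i) (cut : List Int) (l : List (Int × Int)) :
    l.foldl
      (fun (acc : Option Int × List Int) c =>
        match acc.1 with
        | none => (some c.1, PySem.List.pySetD acc.2 i c.2)
        | some mv => if mv < c.1 then (some c.1, PySem.List.pySetD acc.2 i c.2) else acc)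
      ((none : Option Int), cut)
    = (PySem.List.max? l (fun c => c.1)).elim ((none : Option Int), cut)
        (fun c => (some c.1, PySem.List.pySetD cut i c.2)) := by
  have hm : PySem.List.max? l (fun c => c.1)
      = l.foldl
          (fun (acc : Option (Int × Int)) x =>
            match acc with
            | none => some x
            | some m => if m.1 < x.1 then some x else some m) none := by
    unfold PySem.List.max?
    congr 1
    funext acc x
    cases acc <;> rfl
  rw [hm]
  have h : ∀ (acc : Option (Int × Int)),
      l.foldl
        (fun (acc : Option Int × List Int) c =>
          match acc.1 with
          | none => (some c.1, PySem.List.pySetD acc.2 i c.2)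
          | some mv => if mv < c.1 then (some c.1, PySem.List.pySetD acc.2 i c.2) else acc)
        (acc.elim ((none : Option Int), cut) (fun c => (some c.1, PySem.List.pySetD cut i c.2)))
      = (l.foldl
          (fun (acc : Option (Int × Int)) x =>
            match acc with
            | none => some x
            | some m => if m.1 < x.1 then some x else some m) acc).elim
          ((none : Option Int), cut) (fun c => (some c.1, PySem.List.pySetD cut i c.2)) := by
    clear hm
    induction l with
    | nil => intro acc; rfl
    | cons x t ih =>
      intro acc
      cases acc with
      | none => simpa using ih (some x)
      | some c =>
        simp only [List.foldl_cons, Option.elim]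
        by_cases hlt : c.1 < x.1
        · have hset : PySem.List.pySetD (PySem.List.pySetD cut i c.2) i x.2
              = PySem.List.pySetD cut i x.2 := by
            simp [PySem.List.pySetD_of_nonneg _ _ hi, List.set_set]
          simpa [hlt, hset] using ih (some x)
        · simpa [hlt] using ih (some c)
  exact h none

lemma rc_set_map {β : Type} (N : Nat) (f : Nat → β) (i : Nat) (v : β) :
    ((List.range N).map f).set i v
      = (List.range N).map (fun m => if m = i then v else f m) := by
  apply List.ext_getElem
  · simp
  · intro k h1 h2
    simp only [List.length_set, List.length_map, List.length_range] at h1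
    rw [List.getElem_set]
    simp only [List.getElem_map, List.getElem_range]
    by_cases hk : i = k
    · simp [hk]
    · rw [if_neg hk, if_neg (Ne.symm hk)]

-- the chosen first cut of a positive length: the table entry is a cons
lemma rcTbl_succ (prices : List Int) (m : Nat) :
    ∃ j : Nat, j ≤ m ∧
      rcTbl prices (m + 1)
        = (PySem.List.pyGetD prices (j : Int) 0 + (rcTbl prices (m - j)).1,
           ((j : Int) + 1) :: (rcTbl prices (m - j)).2) := by
  have hne : ((List.range (m + 1)).map (fun (j : Nat) =>
      (PySem.List.pyGetD prices (j : Int) 0 + (rcTbl prices (m - j)).1,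
       ((j : Int) + 1) :: (rcTbl prices (m - j)).2))) ≠ [] := by simp
  rcases hs : PySem.List.max? ((List.range (m + 1)).map (fun (j : Nat) =>
      (PySem.List.pyGetD prices (j : Int) 0 + (rcTbl prices (m - j)).1,
       ((j : Int) + 1) :: (rcTbl prices (m - j)).2))) (fun c => c.1) with c | c
  · exact absurd ((PySem.List.max?_eq_none_iff _ _).1 hs) hne
  · have hmem := PySem.List.max?_mem hs
    rcases List.mem_map.1 hmem with ⟨j, hj, hje⟩
    refine ⟨j, by simpa using List.mem_range.1 hj, ?_⟩
    rw [rcTbl]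
    simp only [PySem.List.maxD]
    rw [hs, ← hje]
    rfl

lemma rc_candsB (prices : List Int) (k : Nat) :
    ((PySem.List.pyRange 0 ((k : Int) + 1)).map
      (fun j =>
        let e := PySem.List.pyGetD ((List.range (k + 1)).map (rcTbl prices)) (((k : Int) + 1) - j - 1) (0, [])
        (PySem.List.pyGetD prices j 0 + e.1, (j + 1) :: e.2)))
    = (List.range (k + 1)).map (fun (j : Nat) =>
        (PySem.List.pyGetD prices (j : Int) 0 + (rcTbl prices (k - j)).1,
         ((j : Int) + 1) :: (rcTbl prices (k - j)).2)) := by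
  rw [show ((k : Int) + 1) = ((k + 1 : Nat) : Int) by push_cast; ring]
  rw [PySem.List.pyRange_zero_natCast, List.map_map]
  apply List.map_congr_left
  intro jn hjn
  have hjk : jn ≤ k := by have := List.mem_range.1 hjn; omega
  simp only [Function.comp]
  have hidx : ((k + 1 : Nat) : Int) - (jn : Int) - 1 = ((k - jn : Nat) : Int) := by omega
  rw [hidx]
  simp only [PySem.List.pyGetD_natCast]
  rw [PySem.List.getD_map_range _ _ _ _ (by omega)]

-- B's outer loop builds exactly the table of rcTbl values
lemma rc_outerB (prices : List Int) (k : Nat) :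
    (PySem.List.pyRange 1 ((k : Int) + 1)).foldl
      (fun (table : List (Int × List Int)) length =>
        let cands := (PySem.List.pyRange 0 length).map
          (fun j =>
            let e := PySem.List.pyGetD table (length - j - 1) (0, [])
            (PySem.List.pyGetD prices j 0 + e.1, (j + 1) :: e.2))
        table ++ [PySem.List.maxD cands (fun cand => cand.1) (0, [])])
      [((0 : Int), ([] : List Int))]
    = (List.range (k + 1)).map (rcTbl prices) := by
  induction k with
  | zero =>
    rw [show ((0 : Nat) : Int) + 1 = 1 by norm_num, PySem.List.pyRange_one_eq_nil (by omega)]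
    simp only [List.foldl_nil, List.range_succ, List.range_zero, List.nil_append,
      List.map_cons, List.map_nil]
    rw [rcTbl]
  | succ k ih =>
    rw [show ((k + 1 : Nat) : Int) + 1 = (((k : Nat) : Int) + 1) + 1 by push_cast; ring]
    rw [PySem.List.pyRange_one_succ_right (by omega), List.foldl_append, ih]
    simp only [List.foldl_cons, List.foldl_nil]
    rw [rc_candsB]
    rw [List.range_succ (n := k + 1), List.map_append]
    congr 1
    simp only [List.map_cons, List.map_nil]
    rw [rcTbl]

def rc_dpF (prices : List Int) (k : Nat) : Nat → Int :=
  fun m => if m ≤ k then (rcTbl prices m).1 else 0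
def rc_cutF (prices : List Int) (k : Nat) : Nat → Int :=
  fun m => if 1 ≤ m ∧ m ≤ k then ((rcTbl prices m).2).headI else 0

-- A's inner-loop candidate list in terms of rcTbl
lemma rc_candsA (prices : List Int) (N k : Nat) (hk : k ≤ N) :
    ((PySem.List.pyRange 0 ((k : Int) + 1)).map
      (fun j =>
        ((PySem.List.pyGetD prices j 0
            + PySem.List.pyGetD ((List.range (N + 1)).map (rc_dpF prices k)) (((k : Int) + 1) - j - 1) 0,
          j + 1) : Int × Int)))
    = (List.range (k + 1)).map (fun (j : Nat) =>
        ((PySem.List.pyGetD prices (j : Int) 0 + (rcTbl prices (k - j)).1, (j : Int) + 1) : Int × Int)) := by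
  rw [show ((k : Int) + 1) = ((k + 1 : Nat) : Int) by push_cast; ring]
  rw [PySem.List.pyRange_zero_natCast, List.map_map]
  apply List.map_congr_left
  intro jn hjn
  have hjk : jn ≤ k := by have := List.mem_range.1 hjn; omega
  simp only [Function.comp]
  have hidx : ((k + 1 : Nat) : Int) - (jn : Int) - 1 = ((k - jn : Nat) : Int) := by omega
  rw [hidx]
  simp only [PySem.List.pyGetD_natCast]
  rw [PySem.List.getD_map_range _ _ _ _ (by omega)]
  simp [rc_dpF]

-- the first maximizer exists
lemma rc_argmax (prices : List Int) (k : Nat) :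
    ∃ jstar : Nat, jstar ≤ k ∧
      PySem.List.max? (List.range (k + 1))
        (fun j => PySem.List.pyGetD prices (j : Int) 0 + (rcTbl prices (k - j)).1) = some jstar := by
  rcases hs : PySem.List.max? (List.range (k + 1))
      (fun j => PySem.List.pyGetD prices (j : Int) 0 + (rcTbl prices (k - j)).1) with _ | j
  · have := (PySem.List.max?_eq_none_iff _ _).1 hs
    simp at this
  · exact ⟨j, by have := List.mem_range.1 (PySem.List.max?_mem hs); omega, rfl⟩

-- A's outer loop invariant: dp and cut hold the rcTbl values up to the processed length
lemma rc_outerA (prices : List Int) (N : Nat) :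
    ∀ k, k ≤ N →
    (PySem.List.pyRange 1 ((k : Int) + 1)).foldl
      (fun (st : List Int × List Int) i =>
        let inner := (PySem.List.pyRange 0 i).foldl
          (fun (acc : Option Int × List Int) j =>
            let cand := PySem.List.pyGetD prices j 0 + PySem.List.pyGetD st.1 (i - j - 1) 0
            match acc.1 with
            | none => (some cand, PySem.List.pySetD acc.2 i (j + 1))
            | some mv =>
              if mv < cand then (some cand, PySem.List.pySetD acc.2 i (j + 1)) else acc)
          ((none : Option Int), st.2)
        (PySem.List.pySetD st.1 i (inner.1.getD 0), inner.2))
      (List.replicate (N + 1) 0, List.replicate (N + 1) 0)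
    = ((List.range (N + 1)).map (rc_dpF prices k), (List.range (N + 1)).map (rc_cutF prices k)) := by
  intro k
  induction k with
  | zero =>
    intro _
    rw [show ((0 : Nat) : Int) + 1 = 1 by norm_num, PySem.List.pyRange_one_eq_nil (by omega)]
    simp only [List.foldl_nil]
    have h1 : List.replicate (N + 1) (0 : Int) = (List.range (N + 1)).map (rc_dpF prices 0) := by
      apply List.ext_getElem
      · simp
      · intro m h1 h2
        simp only [List.getElem_replicate, List.getElem_map, List.getElem_range, rc_dpF]
        by_cases hm : m = 0
        · subst hm; rw [if_pos (le_refl 0), rcTbl]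
        · rw [if_neg (by omega)]
    have h2 : List.replicate (N + 1) (0 : Int) = (List.range (N + 1)).map (rc_cutF prices 0) := by
      apply List.ext_getElem
      · simp
      · intro m h1 h2
        simp only [List.getElem_replicate, List.getElem_map, List.getElem_range, rc_cutF]
        rw [if_neg (by omega)]
    rw [← h1, ← h2]
  | succ k ih =>
    intro hk1
    have hk : k ≤ N := by omega
    rw [show ((k + 1 : Nat) : Int) + 1 = (((k : Nat) : Int) + 1) + 1 by push_cast; ring]
    rw [PySem.List.pyRange_one_succ_right (by omega), List.foldl_append, ih hk]
    simp only [List.foldl_cons, List.foldl_nil]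
    obtain ⟨jstar, hjle, hjs⟩ := rc_argmax prices k
    have h6 : rcTbl prices (k + 1)
        = (PySem.List.pyGetD prices (jstar : Int) 0 + (rcTbl prices (k - jstar)).1,
           ((jstar : Int) + 1) :: (rcTbl prices (k - jstar)).2) := by
      rw [rcTbl]
      simp only [PySem.List.maxD]
      rw [rc_max?_map (fun (j : Nat) =>
            (PySem.List.pyGetD prices (j : Int) 0 + (rcTbl prices (k - j)).1,
             ((j : Int) + 1) :: (rcTbl prices (k - j)).2))
          (fun j => PySem.List.pyGetD prices (j : Int) 0 + (rcTbl prices (k - j)).1)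
          (fun c => c.1) (fun x => rfl), hjs]
      rfl
    have hfold :
        (List.foldl
          (fun (acc : Option Int × List Int) j =>
            match acc.1 with
            | none =>
              (some (PySem.List.pyGetD prices j 0 +
                  PySem.List.pyGetD (List.map (rc_dpF prices k) (List.range (N + 1))) ((k : Int) + 1 - j - 1) 0),
                PySem.List.pySetD acc.2 ((k : Int) + 1) (j + 1))
            | some mv =>
              if mv < PySem.List.pyGetD prices j 0 +
                  PySem.List.pyGetD (List.map (rc_dpF prices k) (List.range (N + 1))) ((k : Int) + 1 - j - 1) 0 then
                (some (PySem.List.pyGetD prices j 0 +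
                    PySem.List.pyGetD (List.map (rc_dpF prices k) (List.range (N + 1))) ((k : Int) + 1 - j - 1) 0),
                  PySem.List.pySetD acc.2 ((k : Int) + 1) (j + 1))
              else acc)
          (none, List.map (rc_cutF prices k) (List.range (N + 1))) (PySem.List.pyRange 0 ((k : Int) + 1)))
        = (some (rcTbl prices (k + 1)).1,
           PySem.List.pySetD (List.map (rc_cutF prices k) (List.range (N + 1))) ((k : Int) + 1)
             ((rcTbl prices (k + 1)).2.headI)) := by
      have e1 :
          (List.foldl
            (fun (acc : Option Int × List Int) j =>
              match acc.1 with
              | none =>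
                (some (PySem.List.pyGetD prices j 0 +
                    PySem.List.pyGetD (List.map (rc_dpF prices k) (List.range (N + 1))) ((k : Int) + 1 - j - 1) 0),
                  PySem.List.pySetD acc.2 ((k : Int) + 1) (j + 1))
              | some mv =>
                if mv < PySem.List.pyGetD prices j 0 +
                    PySem.List.pyGetD (List.map (rc_dpF prices k) (List.range (N + 1))) ((k : Int) + 1 - j - 1) 0 then
                  (some (PySem.List.pyGetD prices j 0 +
                      PySem.List.pyGetD (List.map (rc_dpF prices k) (List.range (N + 1))) ((k : Int) + 1 - j - 1) 0),
                    PySem.List.pySetD acc.2 ((k : Int) + 1) (j + 1))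
                else acc)
            (none, List.map (rc_cutF prices k) (List.range (N + 1))) (PySem.List.pyRange 0 ((k : Int) + 1)))
          = (List.foldl
              (fun (acc : Option Int × List Int) (c : Int × Int) =>
                match acc.1 with
                | none => (some c.1, PySem.List.pySetD acc.2 ((k : Int) + 1) c.2)
                | some mv =>
                  if mv < c.1 then (some c.1, PySem.List.pySetD acc.2 ((k : Int) + 1) c.2) else acc)
              (none, List.map (rc_cutF prices k) (List.range (N + 1)))
              ((PySem.List.pyRange 0 ((k : Int) + 1)).map
                (fun j =>
                  ((PySem.List.pyGetD prices j 0
                      + PySem.List.pyGetD ((List.range (N + 1)).map (rc_dpF prices k)) (((k : Int) + 1) - j - 1) 0,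
                    j + 1) : Int × Int)))) := by
        rw [List.foldl_map]
      rw [e1, rc_candsA prices N k hk]
      have hin := rc_innerA ((k : Int) + 1) (by omega)
        (List.map (rc_cutF prices k) (List.range (N + 1)))
        ((List.range (k + 1)).map (fun (j : Nat) =>
          ((PySem.List.pyGetD prices (j : Int) 0 + (rcTbl prices (k - j)).1, (j : Int) + 1) : Int × Int)))
      rw [hin]
      rw [rc_max?_map (fun (j : Nat) =>
            ((PySem.List.pyGetD prices (j : Int) 0 + (rcTbl prices (k - j)).1, (j : Int) + 1) : Int × Int))
          (fun j => PySem.List.pyGetD prices (j : Int) 0 + (rcTbl prices (k - j)).1)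
          (fun c => c.1) (fun x => rfl), hjs]
      simp only [Option.map_some, Option.elim]
      rw [h6]
      rfl
    rw [hfold]
    simp only [Option.getD_some]
    rw [show ((k : Int) + 1) = ((k + 1 : Nat) : Int) by push_cast; ring]
    simp only [PySem.List.pySetD_natCast]
    rw [rc_set_map, rc_set_map]
    refine Prod.ext ?_ ?_
    · apply List.map_congr_left
      intro m hm
      simp only [rc_dpF]
      by_cases h : m = k + 1
      · subst h; simp
      · rw [if_neg h]
        by_cases h2 : m ≤ k
        · rw [if_pos h2, if_pos (by omega)]
        · rw [if_neg h2, if_neg (by omega)]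
    · apply List.map_congr_left
      intro m hm
      simp only [rc_cutF]
      by_cases h : m = k + 1
      · subst h; simp
      · rw [if_neg h]
        by_cases h2 : 1 ≤ m ∧ m ≤ k
        · rw [if_pos h2, if_pos (by omega)]
        · rw [if_neg h2, if_neg (by omega)]

-- the reconstruction walk recovers the stored solution chain
lemma rc_walk (prices cut : List Int) (N : Nat)
    (hcut : ∀ m : Nat, 1 ≤ m → m ≤ N → PySem.List.pyGetD cut (m : Int) 0 = ((rcTbl prices m).2).headI) :
    ∀ (fuel r : Nat), r ≤ fuel → r ≤ N → rcA_walk cut fuel (r : Int) = (rcTbl prices r).2 := by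
  intro fuel
  induction fuel with
  | zero =>
    intro r hrf _
    have hr0 : r = 0 := by omega
    subst hr0
    simp [rcA_walk, rcTbl]
  | succ f ih =>
    intro r hrf hrN
    cases r with
    | zero => simp [rcA_walk, rcTbl]
    | succ m =>
      obtain ⟨j, hj, hble⟩ := rcTbl_succ prices m
      have hc : PySem.List.pyGetD cut ((m + 1 : Nat) : Int) 0 = (j : Int) + 1 := by
        rw [hcut (m + 1) (by omega) hrN, hble]
        rfl
      have hpos : (0 : Int) < ((m + 1 : Nat) : Int) := by omega
      have hsub : ((m + 1 : Nat) : Int) - ((j : Int) + 1) = ((m - j : Nat) : Int) := by omega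
      rw [rcA_walk, if_pos hpos, hc, hsub, ih (m - j) (by omega) (by omega), hble]

-- ===== VERDICT (by name: the statement is the Claim_ definition above) =====
theorem rod_cutting_with_solution_spec : Claim_equal_rod_cutting_with_solution := by
  intro prices n _ hpre
  obtain ⟨hn0, hnlen⟩ := hpre
  unfold Spec_rod_cutting_with_solution
  obtain ⟨N, rfl⟩ : ∃ N : Nat, n = (N : Int) := ⟨n.toNat, (Int.toNat_of_nonneg hn0).symm⟩
  unfold rod_cutting_with_solution rod_cutting_with_solution_alt
  simp only []
  rw [show (((N : Int)) + 1).toNat = N + 1 by omega]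
  rw [rc_outerA prices N N (le_refl N), rc_outerB prices N]
  rw [show ((N : Int)).toNat = N from by omega]
  have hdp : PySem.List.pyGetD ((List.range (N + 1)).map (rc_dpF prices N)) ((N : Int)) 0
      = (rcTbl prices N).1 := by
    rw [PySem.List.pyGetD_natCast, PySem.List.getD_map_range _ _ _ _ (by omega)]
    simp [rc_dpF]
  have htbl : PySem.List.pyGetD ((List.range (N + 1)).map (rcTbl prices)) ((N : Int)) (0, [])
      = rcTbl prices N := by
    rw [PySem.List.pyGetD_natCast, PySem.List.getD_map_range _ _ _ _ (by omega)]
  have hwalk : rcA_walk ((List.range (N + 1)).map (rc_cutF prices N)) N ((N : Int))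
      = (rcTbl prices N).2 := by
    refine rc_walk prices _ N ?_ N N (le_refl N) (le_refl N)
    intro m h1 h2
    rw [PySem.List.pyGetD_natCast, PySem.List.getD_map_range _ _ _ _ (by omega)]
    simp [rc_cutF, h1, h2]
  rw [hdp, htbl, hwalk, rcB_chainToList_id]
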